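-- pv_equiv track=rewrite | github.com/3D-MRI-Tissue-Segmentation/knee-segmentation | Segmentation/train/utils.py | get_slice_paddings
-- ===== SOURCE A (Python) =====
-- import itertools
-- import math
--
-- def get_validation_stride_coords(pad, full_shape, iterator, strides_required):
--     coords = [pad]
--     last_coord = full_shape - pad
--     if not iterator == None: # for when more strides than just corners is required.
--         for stride in range(strides_required):
--             new_coord = coords[-1] + iterator # is not garanteed to be whole number
--             coords.append(new_coord) # adds to coords, we will round at the end
--     if (last_coord != coords[0]) and (last_coord != coords[-1]):
--         coords.append(last_coord)
--     for idx, i in enumerate(coords):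
--         coords[idx] = int(round(i, 0))
--         if idx > 0:
--             assert coords[idx] <= (coords[idx-1] + (pad * 2)), f"Missing points since: {coords[idx]} > {coords[idx-1] + (pad * 2)}"
--     return coords
--
-- def get_val_coords(model_dim, full_dim, slice_output=False, iterator_increase=0):
--     if slice_output:
--         coords = list(range(full_dim))
--     else:
--         pad = model_dim / 2
--         working = full_dim - model_dim
--         strides_required = math.ceil(working / model_dim)
--         iterator = None if strides_required == 0 else (working / strides_required) + iterator_increase
--         coords = get_validation_stride_coords(pad, full_dim, iterator, strides_required)
--     return coords
--
-- def get_validation_spots(crop_size, depth_crop_size, full_shape=(160, 288, 288), slice_output=False, iterator_increase=0):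
--     model_shape = (depth_crop_size * 2, crop_size * 2, crop_size * 2)
--
--     depth_coords = get_val_coords(model_shape[0], full_shape[0], slice_output, iterator_increase=iterator_increase)
--     height_coords = get_val_coords(model_shape[1], full_shape[1], iterator_increase=iterator_increase)
--     width_coords = get_val_coords(model_shape[2], full_shape[2], iterator_increase=iterator_increase)
--
--     coords = [depth_coords, height_coords, width_coords]
--     coords = list(itertools.product(*coords))
--     coords = [list(ele) for ele in coords]
--     return coords
--
-- def get_slice_paddings(crop_size, depth_crop_size, full_shape=(160,288,288), slice_output=True):
--     coords = get_validation_spots(crop_size, depth_crop_size, full_shape, slice_output)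
--     paddings = []
--     for i in coords:
--         depth_lower = i[0] - depth_crop_size
--         depth_upper = full_shape[0] - (i[0] + 1 + depth_crop_size)
--
--         depth = [depth_lower, depth_upper]
--         height = [i[1] - crop_size, full_shape[1] - (i[1] + crop_size)]
--         width = [i[2] - crop_size, full_shape[2] - (i[2] + crop_size)]
--
--         assert depth[0] + depth[1] + (depth_crop_size * 2) + 1 == full_shape[0]
--         assert height[0] + height[1] + (crop_size * 2) == full_shape[1]
--         assert width[0] + width[1] + (crop_size * 2) == full_shape[2]
--
--         padding = [[0, 0], depth, height, width, [0, 0]]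
--         paddings.append(padding)
--     return paddings, coords
-- ===== SOURCE B (Python) =====
-- import itertools
-- import math
--
-- def get_validation_stride_coords(pad, full_shape, iterator, strides_required):
--     coords = [pad]
--     last_coord = full_shape - pad
--     if not iterator == None: # for when more strides than just corners is required.
--         for stride in range(strides_required):
--             new_coord = coords[-1] + iterator # is not garanteed to be whole number
--             coords.append(new_coord) # adds to coords, we will round at the end
--     if (last_coord != coords[0]) and (last_coord != coords[-1]):
--         coords.append(last_coord)
--     for idx, i in enumerate(coords):
--         coords[idx] = int(round(i, 0))
--         if idx > 0:
--             assert coords[idx] <= (coords[idx-1] + (pad * 2)), f"Missing points since: {coords[idx]} > {coords[idx-1] + (pad * 2)}"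
--     return coords
--
-- def get_val_coords(model_dim, full_dim, slice_output=False, iterator_increase=0):
--     if slice_output:
--         coords = list(range(full_dim))
--     else:
--         pad = model_dim / 2
--         working = full_dim - model_dim
--         strides_required = math.ceil(working / model_dim)
--         iterator = None if strides_required == 0 else (working / strides_required) + iterator_increase
--         coords = get_validation_stride_coords(pad, full_dim, iterator, strides_required)
--     return coords
--
-- def get_slice_paddings(crop_size, depth_crop_size, full_shape=(160,288,288), slice_output=True):
--     # per-axis coordinate lists (same coordinate-generation helpers as before)
--     depth_coords = get_val_coords(depth_crop_size * 2, full_shape[0], slice_output)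
--     height_coords = get_val_coords(crop_size * 2, full_shape[1])
--     width_coords = get_val_coords(crop_size * 2, full_shape[2])
--     # per-axis padding tables, computed once per coordinate instead of once per triple
--     depth_pads = [[d - depth_crop_size, full_shape[0] - (d + 1 + depth_crop_size)] for d in depth_coords]
--     height_pads = [[h - crop_size, full_shape[1] - (h + crop_size)] for h in height_coords]
--     width_pads = [[w - crop_size, full_shape[2] - (w + crop_size)] for w in width_coords]
--     pairs = list(itertools.product(zip(depth_coords, depth_pads),
--                                    zip(height_coords, height_pads),
--                                    zip(width_coords, width_pads)))
--     paddings = [[[0, 0], dp, hp, wp, [0, 0]] for (d, dp), (h, hp), (w, wp) in pairs]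
--     coords = [[d, h, w] for (d, dp), (h, hp), (w, wp) in pairs]
--     return paddings, coords
-- ===== Notes on version B (the rewrite author's own statement) =====
-- stated objective: alternative
-- what changed: B keeps the coordinate-generation helpers but replaces A's flat per-triple loop (which recomputes all three axis paddings for every coordinate triple) by three per-axis padding tables zipped with their coordinate lists, with one itertools.product pass over the zipped pairs emitting paddings and coords as two comprehensions.
import Mathlib
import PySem

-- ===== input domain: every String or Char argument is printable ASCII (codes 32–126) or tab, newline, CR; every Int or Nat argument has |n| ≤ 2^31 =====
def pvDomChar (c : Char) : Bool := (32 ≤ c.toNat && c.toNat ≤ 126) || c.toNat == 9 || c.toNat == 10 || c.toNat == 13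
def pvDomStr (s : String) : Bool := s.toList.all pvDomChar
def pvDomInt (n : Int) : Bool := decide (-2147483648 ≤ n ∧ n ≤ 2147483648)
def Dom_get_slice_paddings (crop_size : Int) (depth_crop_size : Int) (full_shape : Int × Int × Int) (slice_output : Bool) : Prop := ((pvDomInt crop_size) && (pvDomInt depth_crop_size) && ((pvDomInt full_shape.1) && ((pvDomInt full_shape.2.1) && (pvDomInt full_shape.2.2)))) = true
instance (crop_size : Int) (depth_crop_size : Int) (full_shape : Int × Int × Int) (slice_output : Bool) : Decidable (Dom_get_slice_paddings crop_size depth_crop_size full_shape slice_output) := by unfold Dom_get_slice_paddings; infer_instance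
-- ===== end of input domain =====

-- B replaces A's flat per-triple padding loop by three per-axis padding tables zipped with their
-- coordinate lists and one product pass (objective: alternative decomposition; same cost).

-- ===== PORT A =====
-- Python computes the stride coordinates in IEEE-754 double arithmetic (`model_dim / 2`,
-- `working / strides_required`, float `+`, `round(x, 0)`, `math.ceil`).  The helpers below model a
-- double EXACTLY as its rational value: every Python float produced here is a normal double (all
-- magnitudes lie far inside the normal range for |int| ≤ 2^31), so each operation is "exact result
-- rounded to 53 significant bits, ties to even", which is what pvFl implements.

-- floor (log2 |q|) for q ≠ 0, via bit lengths of numerator and denominator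
def pvLog2 (q : ℚ) : Int :=
  let a : Nat := q.num.natAbs
  let b : Nat := q.den
  let g : Int := (Nat.log2 a : Int) - (Nat.log2 b : Int)
  if (if 0 ≤ g then b * 2 ^ g.toNat ≤ a else b ≤ a * 2 ^ (-g).toNat) then g else g - 1

def pvPow2 (e : Int) : ℚ := if 0 ≤ e then ((2 : ℚ) ^ e.toNat) else 1 / ((2 : ℚ) ^ (-e).toNat)

-- round to nearest integer, ties to even (= Python's round(x, 0) on an exact value)
def pvRoundNE (x : ℚ) : Int :=
  let n : Int := ⌊x⌋
  let r : ℚ := x - (n : ℚ)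
  if r < 1/2 then n else if 1/2 < r then n + 1 else if n % 2 = 0 then n else n + 1

-- round an exact rational to the nearest IEEE double (53-bit significand, ties to even)
def pvFl (q : ℚ) : ℚ :=
  if q = 0 then 0
  else
    let s : ℚ := pvPow2 (pvLog2 q - 52)
    ((pvRoundNE (q / s) : Int) : ℚ) * s

def pvFAdd (x y : ℚ) : ℚ := pvFl (x + y)   -- float x + y (correctly rounded)
def pvFSub (x y : ℚ) : ℚ := pvFl (x - y)   -- float x - y
def pvFDiv (x y : ℚ) : ℚ := pvFl (x / y)   -- float x / y (Python raises on y = 0: outside Pre_)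

def get_validation_stride_coords (pad : ℚ) (full_shape : Int) (iterator : Option ℚ) (strides_required : Int) : List Int :=
  let coords : List ℚ := [pad]
  let last_coord : ℚ := pvFSub (full_shape : ℚ) pad
  let coords : List ℚ :=
    match iterator with
    | none => coords
    | some it => (List.range strides_required.toNat).foldl (fun cs _ => cs ++ [pvFAdd cs.getLast! it]) coords
  let coords : List ℚ :=
    if last_coord ≠ coords.head! ∧ last_coord ≠ coords.getLast! then coords ++ [last_coord] else coords
  -- final loop: coords[idx] = int(round(i, 0)); the assert (which raises outside Pre_) has no value
  coords.map (fun i => pvRoundNE i)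

def get_val_coords (model_dim : Int) (full_dim : Int) (slice_output : Bool) (iterator_increase : Int) : List Int :=
  if slice_output then PySem.List.pyRange 0 full_dim 1
  else
    let pad : ℚ := pvFDiv (model_dim : ℚ) 2
    let working : Int := full_dim - model_dim
    let strides_required : Int := ⌈pvFDiv (working : ℚ) (model_dim : ℚ)⌉
    let iterator : Option ℚ :=
      if strides_required = 0 then none
      else some (pvFAdd (pvFDiv (working : ℚ) (strides_required : ℚ)) (iterator_increase : ℚ))
    get_validation_stride_coords pad full_dim iterator strides_required

def get_validation_spots (crop_size : Int) (depth_crop_size : Int) (full_shape : Int × Int × Int) (slice_output : Bool) (iterator_increase : Int) : List (List Int) :=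
  let model_shape : Int × Int × Int := (depth_crop_size * 2, crop_size * 2, crop_size * 2)
  let depth_coords := get_val_coords model_shape.1 full_shape.1 slice_output iterator_increase
  let height_coords := get_val_coords model_shape.2.1 full_shape.2.1 false iterator_increase
  let width_coords := get_val_coords model_shape.2.2 full_shape.2.2 false iterator_increase
  -- itertools.product over the three axis lists, tuples turned into 3-element lists
  depth_coords.flatMap (fun d => height_coords.flatMap (fun h => width_coords.map (fun w => [d, h, w])))

def get_slice_paddings (crop_size : Int) (depth_crop_size : Int) (full_shape : Int × Int × Int) (slice_output : Bool) : List (List (List Int)) × List (List Int) :=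
  let coords := get_validation_spots crop_size depth_crop_size full_shape slice_output 0
  -- i[0], i[1], i[2]: every i is a 3-element list, so List.getD is exact here
  let paddings := coords.foldl (fun acc i =>
    let depth : List Int := [i.getD 0 0 - depth_crop_size, full_shape.1 - (i.getD 0 0 + 1 + depth_crop_size)]
    let height : List Int := [i.getD 1 0 - crop_size, full_shape.2.1 - (i.getD 1 0 + crop_size)]
    let width : List Int := [i.getD 2 0 - crop_size, full_shape.2.2 - (i.getD 2 0 + crop_size)]
    -- the three asserts here are arithmetic identities and never fire
    acc ++ [[[0, 0], depth, height, width, [0, 0]]]) []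
  (paddings, coords)

-- ===== PORT B =====
def get_slice_paddings_alt (crop_size : Int) (depth_crop_size : Int) (full_shape : Int × Int × Int) (slice_output : Bool) : List (List (List Int)) × List (List Int) :=
  let depth_coords := get_val_coords (depth_crop_size * 2) full_shape.1 slice_output 0
  let height_coords := get_val_coords (crop_size * 2) full_shape.2.1 false 0
  let width_coords := get_val_coords (crop_size * 2) full_shape.2.2 false 0
  let depth_pads := depth_coords.map (fun d => [d - depth_crop_size, full_shape.1 - (d + 1 + depth_crop_size)])
  let height_pads := height_coords.map (fun h => [h - crop_size, full_shape.2.1 - (h + crop_size)])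
  let width_pads := width_coords.map (fun w => [w - crop_size, full_shape.2.2 - (w + crop_size)])
  let pairs := (depth_coords.zip depth_pads).flatMap (fun x =>
    (height_coords.zip height_pads).flatMap (fun y =>
      (width_coords.zip width_pads).map (fun z => (x, y, z))))
  (pairs.map (fun t => [[0, 0], t.1.2, t.2.1.2, t.2.2.2, [0, 0]]),
   pairs.map (fun t => [t.1.1, t.2.1.1, t.2.2.1]))

-- ===== PRECONDITION & SPEC =====
-- Pre_ restricts to positive crop sizes, the function's natural domain: crop_size = 0 (or
-- depth_crop_size = 0 without slice_output) makes A raise ZeroDivisionError, and negative sizes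
-- make A raise AssertionError on all but knife-edge shapes whose full dimensions coincide with the
-- negative model dimensions (there A happens to return; B returns the same value, see cites).
def Pre_get_slice_paddings (crop_size : Int) (depth_crop_size : Int) (full_shape : Int × Int × Int) (slice_output : Bool) : Prop :=
  1 ≤ crop_size ∧ (slice_output = true ∨ 1 ≤ depth_crop_size)
instance (crop_size : Int) (depth_crop_size : Int) (full_shape : Int × Int × Int) (slice_output : Bool) : Decidable (Pre_get_slice_paddings crop_size depth_crop_size full_shape slice_output) := by unfold Pre_get_slice_paddings; infer_instance

def pvWitness_get_slice_paddings : Int × Int × (Int × Int × Int) × Bool := (2, 3, (12, 16, 16), false)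

def Spec_get_slice_paddings (crop_size : Int) (depth_crop_size : Int) (full_shape : Int × Int × Int) (slice_output : Bool) (out : List (List (List Int)) × List (List Int)) : Prop := out = get_slice_paddings_alt crop_size depth_crop_size full_shape slice_output
instance (crop_size : Int) (depth_crop_size : Int) (full_shape : Int × Int × Int) (slice_output : Bool) (out : List (List (List Int)) × List (List Int)) : Decidable (Spec_get_slice_paddings crop_size depth_crop_size full_shape slice_output out) := by unfold Spec_get_slice_paddings; infer_instance

-- ===== CLAIM (what is proved, stated in full; the proofs are below) =====
def Claim_equal_get_slice_paddings : Prop := ∀ (crop_size : Int) (depth_crop_size : Int) (full_shape : Int × Int × Int) (slice_output : Bool), Dom_get_slice_paddings crop_size depth_crop_size full_shape slice_output → Pre_get_slice_paddings crop_size depth_crop_size full_shape slice_output → Spec_get_slice_paddings crop_size depth_crop_size full_shape slice_output (get_slice_paddings crop_size depth_crop_size full_shape slice_output)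

-- ===== LEMMAS AND PROOFS =====

-- a list zipped with a map of itself is a map of pairs
lemma zip_map_self {α β : Type} (l : List α) (f : α → β) :
    l.zip (l.map f) = l.map (fun a => (a, f a)) := by
  induction l with
  | nil => simp
  | cons a t ih => simp [ih]

-- the key structural fact: B's product over zipped (coord, pad) pairs, projected, equals A's
-- flat map over the coordinate product
lemma core (c dc : Int) (F0 F1 F2 : Int) (D H W : List Int) :
    (let coords := D.flatMap (fun d => H.flatMap (fun h => W.map (fun w => [d, h, w])))
     let paddings := coords.foldl (fun acc i =>
       let depth : List Int := [i.getD 0 0 - dc, F0 - (i.getD 0 0 + 1 + dc)]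
       let height : List Int := [i.getD 1 0 - c, F1 - (i.getD 1 0 + c)]
       let width : List Int := [i.getD 2 0 - c, F2 - (i.getD 2 0 + c)]
       acc ++ [[[0, 0], depth, height, width, [0, 0]]]) []
     (paddings, coords)) =
    (let dpads := D.map (fun d => [d - dc, F0 - (d + 1 + dc)])
     let hpads := H.map (fun h => [h - c, F1 - (h + c)])
     let wpads := W.map (fun w => [w - c, F2 - (w + c)])
     let pairs := (D.zip dpads).flatMap (fun x => (H.zip hpads).flatMap (fun y => (W.zip wpads).map (fun z => (x, y, z))))
     (pairs.map (fun t => [[0, 0], t.1.2, t.2.1.2, t.2.2.2, [0, 0]]),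
      pairs.map (fun t => [t.1.1, t.2.1.1, t.2.2.1]))) := by
  simp only [zip_map_self, PySem.List.foldl_append_singleton_eq_map]
  simp [List.map_flatMap, List.flatMap_map, List.map_map, Function.comp_def, List.getD]

-- ===== VERDICT (by name: the statement is the Claim_ definition above) =====
theorem get_slice_paddings_spec : Claim_equal_get_slice_paddings := by
  intro c dc fs so _ _
  unfold Spec_get_slice_paddings get_slice_paddings get_slice_paddings_alt get_validation_spots
  exact core c dc fs.1 fs.2.1 fs.2.2 _ _ _
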